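-- pv_equiv track=rewrite | github.com/ChloeMayLikeCheese/Brainfk-image-format | viewer.py | brainfk_to_int
-- ===== SOURCE A (Python) =====
-- def brainfk_to_int(bf):
--     count = 0
--     factor = 1
--     for char in reversed(bf):
--         if char == '+':
--             count += factor
--         elif char == '>':
--             factor *= 10
--     return count
-- ===== SOURCE B (Python) =====
-- def brainfk_to_int(bf):
--     value = 0
--     for segment in bf.split('>'):
--         value = value * 10 + segment.count('+')
--     return value
-- ===== Notes on version B (the rewrite author's own statement) =====
-- stated objective: faster
-- what changed: Instead of a reversed per-character Python loop with a running factor, B splits the string on '>' and treats each segment's '+'-count as a digit, combining the segment counts with Horner's rule via the C-implemented str.split and str.count.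
import Mathlib
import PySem

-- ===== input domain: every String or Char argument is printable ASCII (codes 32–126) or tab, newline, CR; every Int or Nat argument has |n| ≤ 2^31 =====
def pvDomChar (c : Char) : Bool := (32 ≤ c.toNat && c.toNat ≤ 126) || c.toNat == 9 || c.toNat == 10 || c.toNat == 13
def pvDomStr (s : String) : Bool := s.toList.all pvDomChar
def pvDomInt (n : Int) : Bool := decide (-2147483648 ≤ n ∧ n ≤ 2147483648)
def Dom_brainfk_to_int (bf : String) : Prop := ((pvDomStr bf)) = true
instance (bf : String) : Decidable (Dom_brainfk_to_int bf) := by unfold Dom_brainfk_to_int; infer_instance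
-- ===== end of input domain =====

-- B replaces A's reversed per-character scan (count, factor) by splitting on '>' and
-- Horner-combining the per-segment '+'-counts as digits (alternative decomposition).

-- ===== PORT A =====
-- A: iterate over reversed(bf), state (count, factor); '+' adds factor, '>' multiplies factor by 10.
def brainfk_to_int_stepA (cf : Int × Int) (ch : Char) : Int × Int :=
  if ch = '+' then (cf.1 + cf.2, cf.2)
  else if ch = '>' then (cf.1, cf.2 * 10)
  else cf

def brainfk_to_int (bf : String) : Int :=
  (bf.toList.reverse.foldl brainfk_to_int_stepA (0, 1)).1

-- ===== PORT B =====
-- B: bf.split('>'), then value = value*10 + segment.count('+') over the segments.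
-- str.split('>') is PySem.Str.split? (some, since the separator is nonempty; getD [] is only Option plumbing).
def brainfk_to_int_segStep (acc : Int) (seg : String) : Int :=
  acc * 10 + (PySem.Str.count seg "+" : Int)

def brainfk_to_int_alt (bf : String) : Int :=
  ((PySem.Str.split? bf ">").getD []).foldl brainfk_to_int_segStep 0

-- ===== PRECONDITION & SPEC =====
def Spec_brainfk_to_int (bf : String) (out : Int) : Prop := out = brainfk_to_int_alt bf
instance (bf : String) (out : Int) : Decidable (Spec_brainfk_to_int bf out) := by unfold Spec_brainfk_to_int; infer_instance

-- ===== CLAIM (what is proved, stated in full; the proofs are below) =====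
def Claim_equal_brainfk_to_int : Prop := ∀ (bf : String), Dom_brainfk_to_int bf → Spec_brainfk_to_int bf (brainfk_to_int bf)

-- ===== LEMMAS AND PROOFS =====

-- Specification-side view of splitting a char list on '>'.
def pvSegs (cur : List Char) : List Char → List (List Char)
  | [] => [cur]
  | c :: r => if c = '>' then cur :: pvSegs [] r else pvSegs (cur ++ [c]) r

-- One unfolding step of PySem.Chars.splitOn.go for the singleton separator ['>'].
theorem pvGo_cons (fuel : Nat) (c : Char) (rest cur : List Char) (acc : List (List Char)) :
    PySem.Chars.splitOn.go ['>'] (fuel + 1) (c :: rest) cur acc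
      = if c = '>' then PySem.Chars.splitOn.go ['>'] fuel rest [] (cur.reverse :: acc)
        else PySem.Chars.splitOn.go ['>'] fuel rest (c :: cur) acc := by
  by_cases h : c = '>'
  · subst h; simp [PySem.Chars.splitOn.go, List.isPrefixOf]
  · simp [PySem.Chars.splitOn.go, List.isPrefixOf, h, Ne.symm h]

theorem pvGo_nil (fuel : Nat) (cur : List Char) (acc : List (List Char)) :
    PySem.Chars.splitOn.go ['>'] fuel [] cur acc = (cur.reverse :: acc).reverse := by
  cases fuel <;> simp [PySem.Chars.splitOn.go]

theorem pvGo_spec (l : List Char) : ∀ (fuel : Nat) (cur : List Char) (acc : List (List Char)),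
    l.length ≤ fuel →
    PySem.Chars.splitOn.go ['>'] fuel l cur acc = acc.reverse ++ pvSegs cur.reverse l := by
  induction l with
  | nil => intro fuel cur acc _; simp [pvGo_nil, pvSegs]
  | cons c rest ih =>
    intro fuel cur acc hf
    cases fuel with
    | zero => simp at hf
    | succ fuel =>
      have hf' : rest.length ≤ fuel := by simpa using hf
      rw [pvGo_cons]
      by_cases h : c = '>'
      · simp only [h, pvSegs, ih fuel [] (cur.reverse :: acc) hf']
        simp
      · simp only [if_neg h, pvSegs, ih fuel (c :: cur) acc hf']
        simp

theorem pvSplitOn_eq (l : List Char) : PySem.Chars.splitOn l ['>'] = pvSegs [] l := by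
  unfold PySem.Chars.splitOn
  rw [pvGo_spec l (l.length + 1) [] [] (by omega)]
  simp

-- count.go for the singleton needle ['+'] is List.count '+'.
theorem pvCountGo (l : List Char) : ∀ (fuel : Nat) (acc : Nat), l.length ≤ fuel →
    PySem.Chars.count.go ['+'] fuel l acc = acc + l.count '+' := by
  induction l with
  | nil => intro fuel acc _; cases fuel <;> simp [PySem.Chars.count.go]
  | cons c rest ih =>
    intro fuel acc hf
    cases fuel with
    | zero => simp at hf
    | succ fuel =>
      have hf' : rest.length ≤ fuel := by simpa using hf
      by_cases h : c = '+'
      · subst h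
        simp [PySem.Chars.count.go, List.isPrefixOf, ih fuel _ hf']
        omega
      · simp [PySem.Chars.count.go, List.isPrefixOf, h, Ne.symm h, ih fuel _ hf']

theorem pvCount_plus (l : List Char) : PySem.Chars.count l ['+'] = l.count '+' := by
  unfold PySem.Chars.count
  simp [pvCountGo l l.length 0 le_rfl]

-- List-level segment step, reached from the String-level one through the PySem bridges.
def pvStepL (acc : Int) (seg : List Char) : Int := acc * 10 + (seg.count '+' : Int)

-- Forward Horner on characters (the common meeting point of the two ports).
def pvW (v : Int) : List Char → Int
  | [] => v
  | c :: r => pvW (if c = '+' then v + 1 else if c = '>' then v * 10 else v) r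

theorem pvFoldSegs (l : List Char) : ∀ (cur : List Char) (s : Int),
    (pvSegs cur l).foldl pvStepL s = pvW (s * 10 + (cur.count '+' : Int)) l := by
  induction l with
  | nil => intro cur s; simp [pvSegs, pvStepL, pvW]
  | cons c rest ih =>
    intro cur s
    by_cases h : c = '>'
    · subst h
      have hseg : pvSegs cur ('>' :: rest) = cur :: pvSegs [] rest := by simp [pvSegs]
      rw [hseg, List.foldl_cons, ih]
      simp only [pvW]
      congr 1
      simp [pvStepL]
    · have hseg : pvSegs cur (c :: rest) = pvSegs (cur ++ [c]) rest := by simp [pvSegs, h]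
      rw [hseg, ih]
      simp only [pvW]
      by_cases h' : c = '+'
      · subst h'
        congr 1
        push_cast [List.count_append, List.count_singleton]
        simp
        ring
      · congr 1
        simp [List.count_append, h', h]

-- 10^(number of '>' in l): A's final factor.
def pvFac (l : List Char) : Int :=
  l.foldr (fun ch f => if ch = '>' then f * 10 else f) 1

theorem pvFac_cons (ch : Char) (l : List Char) :
    pvFac (ch :: l) = if ch = '>' then pvFac l * 10 else pvFac l := rfl

-- Horner invariant: the starting value v is scaled by pvFac l.
theorem pvW_horner (l : List Char) (v : Int) :
    pvW v l = v * pvFac l + pvW 0 l := by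
  induction l generalizing v with
  | nil => simp [pvW, pvFac]
  | cons ch l ih =>
    simp only [pvW, pvFac_cons]
    rw [ih (if ch = '+' then v + 1 else if ch = '>' then v * 10 else v),
        ih (if ch = '+' then (0 : Int) + 1 else if ch = '>' then 0 * 10 else 0)]
    split_ifs with hp hg
    · subst hp; exact absurd hg (by decide)
    · ring
    · ring
    · ring

theorem pvW_plus (l : List Char) : pvW 0 ('+' :: l) = pvW 0 l + pvFac l := by
  simp only [pvW]
  norm_num
  rw [pvW_horner l 1]
  ring

theorem pvW_skip (c : Char) (l : List Char) (hc : c ≠ '+') : pvW 0 (c :: l) = pvW 0 l := by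
  simp only [pvW]
  rw [if_neg hc]
  split_ifs <;> norm_num

-- A's foldr form computes (pvW 0 l, pvFac l).
theorem pvA_eq_W (l : List Char) :
    l.foldr (fun ch acc => brainfk_to_int_stepA acc ch) (0, 1)
      = (pvW 0 l, pvFac l) := by
  induction l with
  | nil => simp [pvW, pvFac]
  | cons ch l ih =>
    simp only [List.foldr_cons, ih]
    unfold brainfk_to_int_stepA
    have hfac := pvFac_cons ch l
    by_cases h1 : ch = '+'
    · subst h1
      rw [if_pos rfl]
      simp only [Prod.mk.injEq]
      exact ⟨(pvW_plus l).symm, by simp [hfac]⟩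
    · rw [if_neg h1]
      by_cases h2 : ch = '>'
      · subst h2
        rw [if_pos rfl]
        simp only [Prod.mk.injEq]
        exact ⟨(pvW_skip _ _ h1).symm, by simp [hfac]⟩
      · rw [if_neg h2]
        simp only [Prod.mk.injEq]
        exact ⟨(pvW_skip _ _ h1).symm, by simp [hfac, h2]⟩

-- ===== VERDICT (by name: the statement is the Claim_ definition above) =====
theorem brainfk_to_int_spec : Claim_equal_brainfk_to_int := by
  intro bf _
  unfold Spec_brainfk_to_int brainfk_to_int brainfk_to_int_alt
  -- A side: reversed foldl = foldr = pvW 0.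
  rw [List.foldl_reverse, pvA_eq_W]
  -- B side: split? is some (separator nonempty); move to the char level.
  have hmap := PySem.Str.split?_map bf ">"
  rw [show PySem.Chars.split? bf.toList ">".toList = some (pvSegs [] bf.toList) by
        simp [PySem.Chars.split?, pvSplitOn_eq, show ">".toList = ['>'] from rfl]] at hmap
  obtain ⟨L, hL, hLm⟩ : ∃ L, PySem.Str.split? bf ">" = some L ∧
      L.map String.toList = pvSegs [] bf.toList := by
    cases hx : PySem.Str.split? bf ">" with
    | none => rw [hx] at hmap; simp at hmap
    | some L =>
      rw [hx] at hmap
      simp only [Option.map_some, Option.some.injEq] at hmap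
      exact ⟨L, rfl, hmap⟩
  rw [hL, Option.getD_some]
  have hstep : L.foldl brainfk_to_int_segStep 0 = (L.map String.toList).foldl pvStepL 0 := by
    rw [List.foldl_map]
    congr 1
    funext a x
    simp [pvStepL, brainfk_to_int_segStep, PySem.Str.count_eq,
      show "+".toList = ['+'] from rfl, pvCount_plus]
  rw [hstep, hLm, pvFoldSegs]
  simp
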